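-- pv_equiv track=rewrite | github.com/jaredap1995/LeetCode | Python/Easy/strings/maxScoreAfterSplittingString.py | solution
-- ===== SOURCE A (Python) =====
-- def solution(s):
--     max_score = 0
--     ones_right = s.count('1')
--     zeros_left = 0
--
--     for i in range(len(s) -1):
--         zeros_left += s[i] == '0'
--         ones_right -= s[i] == '1'
--         max_score = max(max_score, zeros_left+ones_right)
--
--     return max_score
-- ===== SOURCE B (Python) =====
-- def solution(s):
--     n = len(s)
--     prefix = [0]                       # prefix[i] = number of '0' in s[:i]
--     for c in s:
--         prefix.append(prefix[-1] + (c == '0'))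
--     suffix = [0]                       # built reversed: suffix[i] = number of '1' in s[i:]
--     for c in reversed(s):
--         suffix.append(suffix[-1] + (c == '1'))
--     suffix.reverse()
--     return max((prefix[i] + suffix[i] for i in range(1, n)), default=0)
-- ===== Notes on version B (the rewrite author's own statement) =====
-- stated objective: alternative
-- what changed: B replaces A's single fold with running zero/one counters and an inline max by precomputed prefix-zeros and suffix-ones tables combined in a separate max-over-splits pass.
import Mathlib
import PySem

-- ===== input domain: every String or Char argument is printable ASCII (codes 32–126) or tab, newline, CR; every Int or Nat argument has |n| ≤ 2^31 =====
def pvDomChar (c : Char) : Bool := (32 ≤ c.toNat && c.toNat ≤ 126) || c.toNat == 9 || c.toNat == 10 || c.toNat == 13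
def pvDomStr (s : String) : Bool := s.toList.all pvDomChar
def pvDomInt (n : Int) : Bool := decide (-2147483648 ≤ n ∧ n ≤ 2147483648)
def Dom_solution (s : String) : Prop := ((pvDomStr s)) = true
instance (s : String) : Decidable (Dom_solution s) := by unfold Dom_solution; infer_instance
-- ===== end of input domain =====

-- B replaces A's single running-counter fold by prefix/suffix count tables combined in a
-- separate max pass (objective: alternative decomposition, same O(n) cost).

-- ===== PORT A =====
-- literal port of A: one loop over i in range(len(s)-1) carrying (max_score, ones_right, zeros_left);
-- s[i] is ported with PySem.List.pyGet? (the index is always in range, so .getD ' ' never fires)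
def solution (s : String) : Int :=
  let l := s.toList
  let st := (List.range (l.length - 1)).foldl
    (fun (st : Int × Int × Int) (i : Nat) =>
      let zl := st.2.2 + (if (PySem.List.pyGet? l (i : Int)).getD ' ' = '0' then 1 else 0)
      let onr := st.2.1 - (if (PySem.List.pyGet? l (i : Int)).getD ' ' = '1' then 1 else 0)
      (max st.1 (zl + onr), onr, zl))
    (0, (PySem.Str.count s "1" : Int), 0)
  st.1

-- ===== PORT B =====
-- B-side helper: the Python append-loop building a running-sum table (prefix/suffix lists in Source B)
def pvScan (f : Char → Int) : Int → List Char → List Int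
  | a, [] => [a]
  | a, c :: cs => a :: pvScan f (a + f c) cs

def solution_alt (s : String) : Int :=
  let l := s.toList
  let n := l.length
  let pre := pvScan (fun c => if c = '0' then 1 else 0) 0 l
  let suf := (pvScan (fun c => if c = '1' then 1 else 0) 0 l.reverse).reverse
  let cands := (List.range' 1 (n - 1)).map (fun i => pre.getD i 0 + suf.getD i 0)
  (cands.max?).getD 0

-- ===== PRECONDITION & SPEC =====
def Spec_solution (s : String) (out : Int) : Prop := out = solution_alt s
instance (s : String) (out : Int) : Decidable (Spec_solution s out) := by unfold Spec_solution; infer_instance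

-- ===== CLAIM (what is proved, stated in full; the proofs are below) =====
def Claim_equal_solution : Prop := ∀ (s : String), Dom_solution s → Spec_solution s (solution s)

-- ===== LEMMAS AND PROOFS =====

-- indicator functions and the split-score ingredients
def pvZ (c : Char) : Int := if c = '0' then 1 else 0
def pvO (c : Char) : Int := if c = '1' then 1 else 0
def pvG0 (l : List Char) (i : Nat) : Int := ((l.take i).map pvZ).sum
def pvG1 (l : List Char) (i : Nat) : Int := ((l.drop i).map pvO).sum
def pvF (l : List Char) (k : Nat) : Int :=
  (List.range' 1 k).foldl (fun m i => max m (pvG0 l i + pvG1 l i)) 0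

lemma pvScan_length (f : Char → Int) : ∀ (l : List Char) (a : Int),
    (pvScan f a l).length = l.length + 1 := by
  intro l
  induction l with
  | nil => intro a; simp [pvScan]
  | cons c cs ih => intro a; simp [pvScan, ih]

lemma pvScan_getD (f : Char → Int) : ∀ (l : List Char) (i : Nat) (a : Int), i ≤ l.length →
    (pvScan f a l).getD i 0 = a + ((l.take i).map f).sum := by
  intro l
  induction l with
  | nil =>
      intro i a hi
      have h0 : i = 0 := by simpa using hi
      subst h0
      simp [pvScan]
  | cons c cs ih =>
      intro i a hi
      cases i with
      | zero => simp [pvScan]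
      | succ i =>
          simp only [pvScan, List.getD_cons_succ]
          rw [ih i (a + f c) (by simpa using hi)]
          simp [add_assoc]

lemma pre_getD (l : List Char) (i : Nat) (hi : i ≤ l.length) :
    (pvScan (fun c => if c = '0' then 1 else 0) 0 l).getD i 0 = pvG0 l i := by
  rw [pvScan_getD _ _ _ _ hi]
  have hz : (fun c => if c = '0' then (1 : Int) else 0) = pvZ := rfl
  rw [hz]
  simp [pvG0]

lemma getD_reverse (xs : List Int) (i : Nat) (hi : i < xs.length) :
    xs.reverse.getD i 0 = xs.getD (xs.length - 1 - i) 0 := by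
  rw [List.getD_eq_getElem?_getD, List.getD_eq_getElem?_getD]
  rw [List.getElem?_reverse hi]

lemma suf_getD (l : List Char) (i : Nat) (hi : i ≤ l.length) :
    ((pvScan (fun c => if c = '1' then 1 else 0) 0 l.reverse).reverse).getD i 0 = pvG1 l i := by
  have hlen : (pvScan (fun c => if c = '1' then 1 else 0) 0 l.reverse).length = l.length + 1 := by
    rw [pvScan_length]; simp
  rw [getD_reverse _ _ (by omega)]
  rw [hlen]
  have h1 : l.length + 1 - 1 - i = l.length - i := by omega
  rw [h1]
  rw [pvScan_getD _ _ _ _ (by simp)]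
  have ho : (fun c => if c = '1' then (1 : Int) else 0) = pvO := rfl
  rw [ho]
  have h2 : l.reverse.take (l.length - i) = (l.drop i).reverse := by
    rw [List.take_reverse]
    congr 1
    congr 1
    omega
  rw [h2]
  simp [pvG1, List.map_reverse, List.sum_reverse]

lemma pvG0_nonneg (l : List Char) (i : Nat) : 0 ≤ pvG0 l i := by
  apply List.sum_nonneg; intro x hx
  simp only [List.mem_map] at hx
  obtain ⟨c, _, rfl⟩ := hx
  unfold pvZ; split <;> norm_num

lemma pvG1_nonneg (l : List Char) (i : Nat) : 0 ≤ pvG1 l i := by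
  apply List.sum_nonneg; intro x hx
  simp only [List.mem_map] at hx
  obtain ⟨c, _, rfl⟩ := hx
  unfold pvO; split <;> norm_num

lemma max?_getD_eq_foldl (xs : List Int) (h : ∀ x ∈ xs, 0 ≤ x) :
    (xs.max?).getD 0 = xs.foldl max 0 := by
  rw [List.foldl_max]
  cases hm : xs.max? with
  | none => simp
  | some m =>
      have hmem : m ∈ xs := List.max?_mem hm
      have h0 : 0 ≤ m := h m hmem
      simp [max_eq_right h0]

-- Chars.count with a single-character needle is List.count
lemma count_go_singleton (c : Char) : ∀ (l : List Char) (fuel acc : Nat), l.length ≤ fuel →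
    PySem.Chars.count.go [c] fuel l acc = acc + l.count c := by
  intro l
  induction l with
  | nil => intro fuel acc _; cases fuel <;> simp [PySem.Chars.count.go]
  | cons d t ih =>
      intro fuel acc hf
      cases fuel with
      | zero => simp at hf
      | succ f =>
          rw [PySem.Chars.count.go]
          by_cases hcd : c = d
          · subst hcd
            have hp : List.isPrefixOf [c] (c :: t) = true := by simp [List.isPrefixOf]
            simp only [hp, if_pos]
            rw [show List.drop [c].length (c :: t) = t from rfl]
            rw [ih f (acc + 1) (by simpa using hf)]
            simp only [List.count_cons, beq_self_eq_true, if_pos]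
            omega
          · have hp : List.isPrefixOf [c] (d :: t) = false := by
              simp [List.isPrefixOf, hcd]
            simp only [hp, Bool.false_eq_true, if_false]
            rw [ih f acc (by simpa using hf)]
            simp only [List.count_cons, beq_iff_eq, if_neg (fun (h : d = c) => hcd h.symm), add_zero]
lemma chars_count_singleton (l : List Char) (c : Char) :
    PySem.Chars.count l [c] = l.count c := by
  unfold PySem.Chars.count
  rw [if_neg (by simp)]
  simpa using count_go_singleton c l l.length 0 le_rfl

lemma g1_zero_eq_count (l : List Char) : pvG1 l 0 = (l.count '1' : Int) := by
  unfold pvG1 pvO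
  rw [List.drop_zero]
  induction l with
  | nil => simp
  | cons c cs ih =>
      simp [List.count_cons, ih]
      by_cases h : c = '1'
      · simp [h]; ring
      · simp [h]

-- the loop invariant for A's fold
lemma loopA (l : List Char) : ∀ (k : Nat), k ≤ l.length →
    (List.range k).foldl
      (fun (st : Int × Int × Int) (i : Nat) =>
        let zl := st.2.2 + (if (PySem.List.pyGet? l (i : Int)).getD ' ' = '0' then 1 else 0)
        let onr := st.2.1 - (if (PySem.List.pyGet? l (i : Int)).getD ' ' = '1' then 1 else 0)
        (max st.1 (zl + onr), onr, zl))
      (0, pvG1 l 0, 0) = (pvF l k, pvG1 l k, pvG0 l k) := by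
  intro k
  induction k with
  | zero => intro _; simp [pvF, pvG0, pvG1]
  | succ k ih =>
      intro hk
      have hklt : k < l.length := by omega
      rw [List.range_succ, List.foldl_append, ih (by omega)]
      simp only [List.foldl_cons, List.foldl_nil]
      have hget : (PySem.List.pyGet? l (k : Int)).getD ' ' = l[k] := by
        rw [PySem.List.pyGet?_natCast]
        simp [List.getElem?_eq_getElem hklt]
      have hg0 : pvG0 l (k + 1) = pvG0 l k + pvZ l[k] := by
        unfold pvG0
        rw [List.map_take, List.map_take, List.sum_take_succ _ k (by simpa using hklt)]
        simp
      have hg1 : pvG1 l k = pvO l[k] + pvG1 l (k + 1) := by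
        unfold pvG1
        rw [List.map_drop, List.map_drop, List.drop_eq_getElem_cons (by simpa using hklt)]
        simp [add_comm]
      have hF : pvF l (k + 1) = max (pvF l k) (pvG0 l (k + 1) + pvG1 l (k + 1)) := by
        unfold pvF
        rw [List.range'_1_concat, List.foldl_append]
        simp [Nat.add_comm 1 k]
      rw [hget]
      have e1 : pvG0 l k + (if l[k] = '0' then (1 : Int) else 0) = pvG0 l (k + 1) := by
        rw [hg0]; rfl
      have e2 : pvG1 l k - (if l[k] = '1' then (1 : Int) else 0) = pvG1 l (k + 1) := by
        rw [hg1]; unfold pvO; ring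
      rw [e1, e2, hF]

lemma solution_eq_F (s : String) : solution s = pvF s.toList (s.toList.length - 1) := by
  unfold solution
  have hc : (PySem.Str.count s "1" : Int) = pvG1 s.toList 0 := by
    rw [g1_zero_eq_count]
    rw [PySem.Str.count_eq]
    have : "1".toList = ['1'] := rfl
    rw [this, chars_count_singleton]
  simp only [hc]
  rw [loopA s.toList (s.toList.length - 1) (by omega)]

lemma solution_alt_eq_F (s : String) : solution_alt s = pvF s.toList (s.toList.length - 1) := by
  unfold solution_alt
  simp only
  set l := s.toList with hl
  set n := l.length with hn
  have hmap : (List.range' 1 (n - 1)).map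
      (fun i => (pvScan (fun c => if c = '0' then 1 else 0) 0 l).getD i 0 +
                ((pvScan (fun c => if c = '1' then 1 else 0) 0 l.reverse).reverse).getD i 0)
      = (List.range' 1 (n - 1)).map (fun i => pvG0 l i + pvG1 l i) := by
    apply List.map_congr_left
    intro i hi
    have hi' : 1 ≤ i ∧ i < 1 + (n - 1) := by
      constructor
      · exact (List.mem_range'_1.mp hi).1
      · exact (List.mem_range'_1.mp hi).2
    have hin : i ≤ n := by omega
    rw [pre_getD l i hin, suf_getD l i hin]
  rw [hmap]
  rw [max?_getD_eq_foldl]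
  · rw [List.foldl_map]
    rfl
  · intro x hx
    simp only [List.mem_map] at hx
    obtain ⟨i, _, rfl⟩ := hx
    exact add_nonneg (pvG0_nonneg l i) (pvG1_nonneg l i)

-- ===== VERDICT (by name: the statement is the Claim_ definition above) =====
theorem solution_spec : Claim_equal_solution := by
  intro s _
  unfold Spec_solution
  rw [solution_eq_F, solution_alt_eq_F]
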